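-- pv_equiv track=rewrite | github.com/jdido08/TheShapesOfStories | src/archive/archive_story_metadata_older_version_9_30_2025.py | _clean_themes_display
-- ===== SOURCE A (Python) =====
-- def _casefold_set(xs):
--     seen, out = set(), []
--     for x in xs or []:
--         k = (x or "").strip()
--         if not k: continue
--         cf = k.casefold()
--         if cf not in seen:
--             seen.add(cf); out.append(k)
--     return out
--
-- _THEME_DROP_EXACT = {
--     "adaptations","criticism and interpretation","readers for new literates",
--     "slavic philology","fiction","fiction, psychological","psychological fiction"
-- }
--
-- _THEME_DROP_CONTAINS = ["textbooks","study guides","juvenile","guidebooks","translations"]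
--
-- def _clean_themes_display(themes):
--     cleaned = []
--     for t in themes or []:
--         tl = (t or "").strip()
--         if not tl: continue
--         c = tl.casefold()
--         if c in _THEME_DROP_EXACT:
--             continue
--         if any(sub in c for sub in _THEME_DROP_CONTAINS):
--             continue
--         cleaned.append(tl)
--     return _casefold_set(cleaned)
-- ===== SOURCE B (Python) =====
-- _THEME_DROP_EXACT = {
--     "adaptations","criticism and interpretation","readers for new literates",
--     "slavic philology","fiction","fiction, psychological","psychological fiction"
-- }
--
-- _THEME_DROP_CONTAINS = ["textbooks","study guides","juvenile","guidebooks","translations"]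
--
-- def _clean_themes_display(themes):
--     # Single fused pass: filter, dedupe by casefold and build the output at once.
--     seen, out = set(), []
--     for t in themes or []:
--         tl = (t or "").strip()
--         if not tl:
--             continue
--         c = tl.casefold()
--         if c in _THEME_DROP_EXACT or any(sub in c for sub in _THEME_DROP_CONTAINS) or c in seen:
--             continue
--         seen.add(c)
--         out.append(tl)
--     return out
-- ===== Notes on version B (the rewrite author's own statement) =====
-- stated objective: simpler
-- what changed: B fuses A's two passes (filter loop building an intermediate list, then a second dedup loop that re-strips every element) into one loop that filters, dedupes by casefold and emits in a single pass with no intermediate list.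
import Mathlib
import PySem

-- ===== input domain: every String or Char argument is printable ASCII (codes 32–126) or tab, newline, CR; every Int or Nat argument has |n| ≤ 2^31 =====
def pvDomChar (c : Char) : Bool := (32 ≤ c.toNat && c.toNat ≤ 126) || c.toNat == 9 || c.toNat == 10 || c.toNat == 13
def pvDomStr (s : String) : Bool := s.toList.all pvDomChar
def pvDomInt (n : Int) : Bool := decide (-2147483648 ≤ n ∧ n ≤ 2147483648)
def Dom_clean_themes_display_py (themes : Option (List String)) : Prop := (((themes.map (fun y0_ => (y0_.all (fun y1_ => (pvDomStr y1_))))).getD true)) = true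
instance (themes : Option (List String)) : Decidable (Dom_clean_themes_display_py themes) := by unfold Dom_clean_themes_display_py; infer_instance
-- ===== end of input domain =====

-- B fuses A's two passes (filter loop building an intermediate list, then a dedup loop that re-strips) into one loop; objective: simpler.
-- str.casefold is ported as PySem.Str.lower, exact on the ASCII domain Dom_.

-- ===== PORT A =====
def pvDropExact : List String :=
  ["adaptations","criticism and interpretation","readers for new literates",
   "slavic philology","fiction","fiction, psychological","psychological fiction"]

def pvDropContains : List String := ["textbooks","study guides","juvenile","guidebooks","translations"]

-- loop body of _casefold_set (state = (seen, out)); k = (x or "").strip(), cf = k.casefold()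
def pvCsStep (st : PySem.Set String × List String) (x : String) : PySem.Set String × List String :=
  if PySem.Str.strip x = "" then st
  else if PySem.Set.contains st.1 (PySem.Str.lower (PySem.Str.strip x)) then st
  else (PySem.Set.add st.1 (PySem.Str.lower (PySem.Str.strip x)), st.2 ++ [PySem.Str.strip x])

def casefold_set_py (xs : List String) : List String :=
  (xs.foldl pvCsStep (PySem.Set.empty, [])).2

-- loop body of A's filter loop; tl = (t or "").strip(), c = tl.casefold()
def pvFilterStep (acc : List String) (t : String) : List String :=
  if PySem.Str.strip t = "" then acc
  else if PySem.Set.contains (PySem.Set.ofList pvDropExact) (PySem.Str.lower (PySem.Str.strip t)) then acc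
  else if pvDropContains.any (fun sub => PySem.Str.isIn sub (PySem.Str.lower (PySem.Str.strip t))) then acc
  else acc ++ [PySem.Str.strip t]

def clean_themes_display_py (themes : Option (List String)) : List String :=
  casefold_set_py ((themes.getD []).foldl pvFilterStep [])

-- ===== PORT B =====
-- single fused loop body (state = (seen, out))
def pvAltStep (st : PySem.Set String × List String) (t : String) : PySem.Set String × List String :=
  if PySem.Str.strip t = "" then st
  else if PySem.Set.contains (PySem.Set.ofList pvDropExact) (PySem.Str.lower (PySem.Str.strip t))
        || pvDropContains.any (fun sub => PySem.Str.isIn sub (PySem.Str.lower (PySem.Str.strip t)))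
        || PySem.Set.contains st.1 (PySem.Str.lower (PySem.Str.strip t)) then st
  else (PySem.Set.add st.1 (PySem.Str.lower (PySem.Str.strip t)), st.2 ++ [PySem.Str.strip t])

def clean_themes_display_py_alt (themes : Option (List String)) : List String :=
  ((themes.getD []).foldl pvAltStep (PySem.Set.empty, [])).2

-- ===== PRECONDITION & SPEC =====
def Spec_clean_themes_display_py (themes : Option (List String)) (out : List String) : Prop := out = clean_themes_display_py_alt themes
instance (themes : Option (List String)) (out : List String) : Decidable (Spec_clean_themes_display_py themes out) := by unfold Spec_clean_themes_display_py; infer_instance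

-- ===== CLAIM (what is proved, stated in full; the proofs are below) =====
def Claim_equal_clean_themes_display_py : Prop := ∀ (themes : Option (List String)), Dom_clean_themes_display_py themes → Spec_clean_themes_display_py themes (clean_themes_display_py themes)

-- ===== LEMMAS AND PROOFS =====

theorem dropWhile_eq_self_of_prefix {p : Char → Bool} {m s : List Char}
    (hm : List.dropWhile p m = m) (hs : s <+: m) : List.dropWhile p s = s := by
  cases s with
  | nil => simp
  | cons a t =>
    obtain ⟨r, hr⟩ := hs
    subst hr
    simp only [List.cons_append, List.dropWhile_cons] at hm ⊢
    split at hm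
    · have hle := List.length_dropWhile_le p (t ++ r)
      rw [hm] at hle
      simp at hle
    · simp_all

theorem dropWhile_idem (p : Char → Bool) (l : List Char) :
    List.dropWhile p (List.dropWhile p l) = List.dropWhile p l := by
  induction l with
  | nil => simp
  | cons a t ih => by_cases h : p a <;> simp [h, ih]

theorem rstrip_prefix (m : List Char) : PySem.Chars.rstrip m <+: m := by
  have h : List.dropWhile PySem.Chars.isspace m.reverse <:+ m.reverse :=
    List.dropWhile_suffix _
  have h2 := (List.reverse_prefix (l₁ := List.dropWhile PySem.Chars.isspace m.reverse)
      (l₂ := m.reverse)).mpr h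
  simpa [PySem.Chars.rstrip] using h2

theorem rstrip_idem (x : List Char) :
    PySem.Chars.rstrip (PySem.Chars.rstrip x) = PySem.Chars.rstrip x := by
  unfold PySem.Chars.rstrip
  rw [List.reverse_reverse, dropWhile_idem]

theorem lstrip_strip (l : List Char) :
    PySem.Chars.lstrip (PySem.Chars.strip l) = PySem.Chars.strip l := by
  unfold PySem.Chars.strip PySem.Chars.lstrip
  exact dropWhile_eq_self_of_prefix (dropWhile_idem _ l) (rstrip_prefix _)

theorem chars_strip_idem (l : List Char) :
    PySem.Chars.strip (PySem.Chars.strip l) = PySem.Chars.strip l := by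
  show PySem.Chars.rstrip (PySem.Chars.lstrip (PySem.Chars.strip l)) = PySem.Chars.strip l
  rw [lstrip_strip]
  show PySem.Chars.rstrip (PySem.Chars.rstrip (PySem.Chars.lstrip l)) = PySem.Chars.strip l
  rw [rstrip_idem]
  rfl

theorem str_strip_idem (s : String) : PySem.Str.strip (PySem.Str.strip s) = PySem.Str.strip s := by
  simp [PySem.Str.strip, chars_strip_idem]

theorem filter_foldl_append (ts : List String) (acc : List String) :
    ts.foldl pvFilterStep acc = acc ++ ts.foldl pvFilterStep [] := by
  induction ts generalizing acc with
  | nil => simp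
  | cons t ts ih =>
    have hstep : ∀ a, pvFilterStep a t = a ++ pvFilterStep [] t := by
      intro a; unfold pvFilterStep; split_ifs <;> simp
    rw [List.foldl_cons, ih, List.foldl_cons, ih (pvFilterStep [] t), hstep, List.append_assoc]

theorem step_eq (st : PySem.Set String × List String) (t : String) :
    (pvFilterStep [] t).foldl pvCsStep st = pvAltStep st t := by
  have hidem : PySem.Str.strip (PySem.Str.strip t) = PySem.Str.strip t := str_strip_idem t
  by_cases h0 : PySem.Str.strip t = ""
  · rw [pvFilterStep, if_pos h0, pvAltStep, if_pos h0]; rfl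
  · rw [pvFilterStep, if_neg h0, pvAltStep, if_neg h0]
    cases hE : PySem.Set.contains (PySem.Set.ofList pvDropExact) (PySem.Str.lower (PySem.Str.strip t)) with
    | true => simp
    | false =>
      cases hC : pvDropContains.any (fun sub => PySem.Str.isIn sub (PySem.Str.lower (PySem.Str.strip t))) with
      | true => simp
      | false =>
        simp only [Bool.false_eq_true, if_false, Bool.false_or, List.nil_append, List.foldl_cons,
          List.foldl_nil, pvCsStep]
        rw [if_neg (by rw [hidem]; exact h0)]
        simp [hidem]

theorem fused_eq (ts : List String) (st : PySem.Set String × List String) :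
    (ts.foldl pvFilterStep []).foldl pvCsStep st = ts.foldl pvAltStep st := by
  induction ts generalizing st with
  | nil => simp
  | cons t ts ih =>
    rw [List.foldl_cons, filter_foldl_append ts (pvFilterStep [] t), List.foldl_append,
      step_eq st t, List.foldl_cons, ih]

-- ===== VERDICT (by name: the statement is the Claim_ definition above) =====
theorem clean_themes_display_py_spec : Claim_equal_clean_themes_display_py := by
  intro themes _
  unfold Spec_clean_themes_display_py clean_themes_display_py clean_themes_display_py_alt casefold_set_py
  rw [fused_eq]
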